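-- pv_equiv track=rewrite | github.com/tigantic/physics-os | tensornet/cfd/ns2d_qtt_native.py | morton_encode_2d
-- ===== SOURCE A (Python) =====
-- def morton_encode_2d(ix: int, iy: int, nx_bits: int, ny_bits: int) -> int:
--     """Encode 2D index to Morton order (interleaved bits)."""
--     z = 0
--     max_bits = max(nx_bits, ny_bits)
--     for b in range(max_bits):
--         if b < nx_bits:
--             z |= ((ix >> b) & 1) << (2 * b)
--         if b < ny_bits:
--             z |= ((iy >> b) & 1) << (2 * b + 1)
--     return z
-- ===== SOURCE B (Python) =====
-- # Nibble-table Morton spreading: mask each coordinate to its bit width once,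
-- # then spread 4 bits per iteration via a 16-entry lookup table, combining
-- # the two spread words arithmetically (even/odd bit positions are disjoint).
--
-- _SPREAD4 = (0, 1, 4, 5, 16, 17, 20, 21, 64, 65, 68, 69, 80, 81, 84, 85)
--
--
-- def _spread(x):
--     """Spread the bits of nonnegative x (bit i -> bit 2*i), a nibble at a time."""
--     r = 0
--     mul = 1
--     while x:
--         r += _SPREAD4[x % 16] * mul
--         x //= 16
--         mul *= 256
--     return r
--
--
-- def morton_encode_2d(ix: int, iy: int, nx_bits: int, ny_bits: int) -> int:
--     """Encode 2D index to Morton order (interleaved bits)."""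
--     x = ix % (1 << nx_bits) if nx_bits > 0 else 0
--     y = iy % (1 << ny_bits) if ny_bits > 0 else 0
--     return _spread(x) + 2 * _spread(y)
-- ===== Notes on version B (the rewrite author's own statement) =====
-- stated objective: faster
-- what changed: Replaces A's one-bit-per-iteration loop over max(nx_bits, ny_bits) with a single mask per coordinate followed by nibble-at-a-time spreading through a 16-entry lookup table (4 bits per iteration, arithmetic accumulation instead of shift-and-OR per bit).
import Mathlib
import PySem

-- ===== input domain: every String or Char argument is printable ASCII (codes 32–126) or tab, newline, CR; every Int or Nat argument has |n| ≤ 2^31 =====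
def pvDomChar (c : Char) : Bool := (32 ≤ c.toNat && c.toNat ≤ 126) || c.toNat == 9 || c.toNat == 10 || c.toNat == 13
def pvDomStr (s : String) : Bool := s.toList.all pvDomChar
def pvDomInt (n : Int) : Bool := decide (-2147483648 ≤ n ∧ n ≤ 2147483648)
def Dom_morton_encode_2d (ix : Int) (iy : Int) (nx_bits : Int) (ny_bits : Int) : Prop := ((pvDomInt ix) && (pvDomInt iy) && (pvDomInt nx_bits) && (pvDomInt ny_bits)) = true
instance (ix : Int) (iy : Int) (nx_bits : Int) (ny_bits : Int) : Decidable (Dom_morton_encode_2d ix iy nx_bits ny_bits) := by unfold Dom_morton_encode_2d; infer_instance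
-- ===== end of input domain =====

-- B replaces A's one-bit-per-iteration interleaving loop with a single mask per
-- coordinate plus nibble-at-a-time spreading through a 16-entry table (objective: faster).

-- ===== PORT A =====
-- literal port of A: z = 0; for b in range(max(nx_bits, ny_bits)): ...
-- b comes from range so 0 ≤ b; '.toNat' on the shift amounts is exact there.
def morton_encode_2d (ix : Int) (iy : Int) (nx_bits : Int) (ny_bits : Int) : Int :=
  let max_bits := max nx_bits ny_bits
  (PySem.List.pyRange 0 max_bits 1).foldl (fun z b =>
    let z := if b < nx_bits then
        PySem.Int.bor z ((PySem.Int.band (ix >>> b.toNat) 1) <<< (2 * b).toNat)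
      else z
    if b < ny_bits then
      PySem.Int.bor z ((PySem.Int.band (iy >>> b.toNat) 1) <<< (2 * b + 1).toNat)
    else z) 0

-- ===== PORT B =====
-- _SPREAD4 table of Source B
def spreadTbl : List Nat := [0, 1, 4, 5, 16, 17, 20, 21, 64, 65, 68, 69, 80, 81, 84, 85]

-- the 'while x:' loop of Source B's _spread; its argument is nonnegative in Source B
-- (result of '% (1 << n)' with positive modulus), so Nat state is exact.
def spreadLoop (x r mul : Nat) : Nat :=
  if x = 0 then r
  else spreadLoop (x / 16) (r + (spreadTbl.getD (x % 16) 0) * mul) (mul * 256)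
  termination_by x
  decreasing_by exact Nat.div_lt_self (Nat.pos_of_ne_zero (by assumption)) (by omega)

def morton_encode_2d_alt (ix : Int) (iy : Int) (nx_bits : Int) (ny_bits : Int) : Int :=
  let x : Int := if nx_bits > 0 then PySem.Int.mod ix ((1 : Int) <<< nx_bits.toNat) else 0
  let y : Int := if ny_bits > 0 then PySem.Int.mod iy ((1 : Int) <<< ny_bits.toNat) else 0
  (spreadLoop x.toNat 0 1 : Int) + 2 * (spreadLoop y.toNat 0 1 : Int)

-- ===== PRECONDITION & SPEC =====
def Spec_morton_encode_2d (ix : Int) (iy : Int) (nx_bits : Int) (ny_bits : Int) (out : Int) : Prop := out = morton_encode_2d_alt ix iy nx_bits ny_bits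
instance (ix : Int) (iy : Int) (nx_bits : Int) (ny_bits : Int) (out : Int) : Decidable (Spec_morton_encode_2d ix iy nx_bits ny_bits out) := by unfold Spec_morton_encode_2d; infer_instance

-- ===== CLAIM (what is proved, stated in full; the proofs are below) =====
def Claim_equal_morton_encode_2d : Prop := ∀ (ix : Int) (iy : Int) (nx_bits : Int) (ny_bits : Int), Dom_morton_encode_2d ix iy nx_bits ny_bits → Spec_morton_encode_2d ix iy nx_bits ny_bits (morton_encode_2d ix iy nx_bits ny_bits)

-- ===== LEMMAS AND PROOFS =====

def natSpread (x : Nat) : Nat :=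
  if x = 0 then 0 else x % 2 + 4 * natSpread (x / 2)
  termination_by x
  decreasing_by exact Nat.div_lt_self (Nat.pos_of_ne_zero (by assumption)) (by omega)

theorem natSpread_eq (x : Nat) : natSpread x = x % 2 + 4 * natSpread (x / 2) := by
  rw [natSpread]; split
  · subst x; rw [natSpread]; simp
  · rfl

theorem natSpread_split (k : Nat) : ∀ a b : Nat, a < 2 ^ k →
    natSpread (a + 2 ^ k * b) = natSpread a + 4 ^ k * natSpread b := by
  induction k with
  | zero =>
    intro a b h; interval_cases a
    have h0 : natSpread 0 = 0 := by rw [natSpread]; simp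
    simp [h0]
  | succ k ih =>
    intro a b h
    rw [natSpread_eq (a + 2 ^ (k+1) * b), natSpread_eq a]
    have h1 : (a + 2 ^ (k+1) * b) % 2 = a % 2 := by
      have : 2 ^ (k+1) * b = 2 * (2 ^ k * b) := by ring
      omega
    have h2 : (a + 2 ^ (k+1) * b) / 2 = a / 2 + 2 ^ k * b := by
      have : 2 ^ (k+1) * b = 2 * (2 ^ k * b) := by ring
      omega
    rw [h1, h2, ih (a / 2) b (by omega)]
    ring

theorem natSpread_bound (k : Nat) : ∀ x : Nat, x < 2 ^ k → 3 * natSpread x < 4 ^ k := by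
  induction k with
  | zero => intro x h; interval_cases x; simp [natSpread]
  | succ k ih =>
    intro x h
    rw [natSpread_eq]
    have := ih (x / 2) (by omega)
    have : (4:Nat) ^ (k+1) = 4 * 4 ^ k := by ring
    omega
theorem spreadTbl_eq (d : Nat) (h : d < 16) : spreadTbl.getD d 0 = natSpread d := by
  have e := natSpread_eq
  have h0 : natSpread 0 = 0 := by rw [natSpread]; simp
  interval_cases d <;> simp only [spreadTbl, List.getD] <;> rw [e, e, e, e] <;> norm_num [h0]

theorem natSpread_split16 (x : Nat) : natSpread x = natSpread (x % 16) + 256 * natSpread (x / 16) := by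
  have h := natSpread_split 4 (x % 16) (x / 16) (by omega)
  have : x % 16 + 2 ^ 4 * (x / 16) = x := by omega
  rw [this] at h; rw [h]; norm_num

theorem spreadLoop_eq (x : Nat) : ∀ r mul, spreadLoop x r mul = r + natSpread x * mul := by
  induction x using Nat.strong_induction_on with
  | _ x ih =>
    intro r mul
    rw [spreadLoop]
    by_cases hx : x = 0
    · simp [hx, show natSpread 0 = 0 from by rw [natSpread]; simp]
    · simp only [hx, if_false]
      rw [ih (x / 16) (Nat.div_lt_self (Nat.pos_of_ne_zero hx) (by omega))]
      rw [spreadTbl_eq (x % 16) (by omega), natSpread_split16 x]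
      ring
theorem nat_lor_pow_add (n a c : Nat) (h : a < 2 ^ n) : a ||| c * 2 ^ n = a + c * 2 ^ n := by
  apply Nat.eq_of_testBit_eq
  intro i
  have hmul : c * 2 ^ n = 2 ^ n * c + 0 := by ring
  have hadd : a + c * 2 ^ n = 2 ^ n * c + a := by ring
  rw [Nat.testBit_lor, hadd, hmul,
    Nat.testBit_two_pow_mul_add c (show (0:Nat) < 2 ^ n by positivity) i]
  rw [Nat.testBit_two_pow_mul_add c h i]
  by_cases hi : i < n
  · simp [hi]
  · simp only [hi, if_false]
    have : a.testBit i = false :=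
      Nat.testBit_eq_false_of_lt (lt_of_lt_of_le h (Nat.pow_le_pow_right (by omega) (by omega)))
    simp [this]
theorem bit_of_emod (ix : Int) (n k : Nat) (hk : k < n) :
    PySem.Int.band (ix >>> k) 1 = (((ix.emod (2 ^ n)).toNat / 2 ^ k % 2 : Nat) : Int) := by
  rw [PySem.Int.band_one, PySem.Int.mod_eq_emod_of_pos (by omega : (0:Int) < 2),
    Int.shiftRight_eq_div_pow]
  have hcast : ((2 ^ k : Nat) : Int) = (2 : Int) ^ k := by push_cast; ring
  rw [hcast]
  have hrnn : (0:Int) ≤ ix % (2 ^ n) := Int.emod_nonneg ix (by positivity)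
  have h1 : (2 ^ n : Int) * (ix / 2 ^ n) + ix % 2 ^ n = ix := Int.mul_ediv_add_emod ix (2 ^ n)
  have h2 : (2 ^ k : Int) * (2 : Int) ^ (n - k) = 2 ^ n := by
    rw [← pow_add]; congr 1; omega
  have hdecomp : ix = ix % (2 ^ n) + (2 ^ k : Int) * ((2 : Int) ^ (n - k) * (ix / 2 ^ n)) := by
    rw [← mul_assoc, h2]; linarith
  conv_lhs => rw [hdecomp]
  rw [Int.add_mul_ediv_left _ _ (by positivity : (2 ^ k : Int) ≠ 0)]
  have hsplit : (2 : Int) ^ (n - k) * (ix / 2 ^ n) = 2 * ((2 : Int) ^ (n - k - 1) * (ix / 2 ^ n)) := by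
    rw [← mul_assoc, ← pow_succ']; congr 2; omega
  rw [hsplit, Int.add_mul_emod_self_left]
  have hteq : (ix % (2 ^ n) : Int) = (((ix.emod (2 ^ n)).toNat : Nat) : Int) :=
    (Int.toNat_of_nonneg hrnn).symm
  rw [hteq]
  push_cast [Int.natCast_div]
  ring
theorem natSpread_bit (b : Nat) (hb : b < 2) : natSpread b = b := by
  interval_cases b
  · rw [natSpread]; simp
  · rw [natSpread]; norm_num; rw [natSpread]; simp

theorem pow4_eq (m : Nat) : (4:Nat) ^ m = 2 ^ (2 * m) := by
  rw [show (4:Nat) = 2 ^ 2 by norm_num, ← pow_mul]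

theorem loopA_formula (ix iy nx_bits ny_bits : Int) (m : Nat) :
    (PySem.List.pyRange 0 (m : Int) 1).foldl (fun z b =>
      let z := if b < nx_bits then
          PySem.Int.bor z ((PySem.Int.band (ix >>> b.toNat) 1) <<< (2 * b).toNat)
        else z
      if b < ny_bits then
        PySem.Int.bor z ((PySem.Int.band (iy >>> b.toNat) 1) <<< (2 * b + 1).toNat)
      else z) 0
    = ((natSpread ((ix.emod (2 ^ nx_bits.toNat)).toNat % 2 ^ (min m nx_bits.toNat))
        + 2 * natSpread ((iy.emod (2 ^ ny_bits.toNat)).toNat % 2 ^ (min m ny_bits.toNat)) : Nat) : Int) := by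
  have h0 : natSpread 0 = 0 := by rw [natSpread]; simp
  induction m with
  | zero =>
    rw [show ((0:Nat):Int) = 0 from rfl, PySem.List.pyRange_one_eq_nil (by omega)]
    simp [h0, Nat.mod_one]
  | succ m ih =>
    have ihv := ih
    rw [show (((m+1:Nat)):Int) = (m:Int) + 1 by push_cast; ring,
      PySem.List.pyRange_one_succ_right (by omega : (0:Int) ≤ (m:Int)),
      List.foldl_append, ihv]
    simp only [List.foldl_cons, List.foldl_nil]
    have t1 : ((m:Int)).toNat = m := by omega
    have t2 : ((2 * (m:Int))).toNat = 2 * m := by omega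
    have t3 : ((2 * (m:Int) + 1)).toNat = 2 * m + 1 := by omega
    simp only [t1, t2, t3]
    have hp : (4:Nat) ^ m = 2 ^ (2*m) := pow4_eq m
    have hkey : ∀ A B bx by_ : Nat, 3*A < 4^m → 3*B < 4^m → bx < 2 → by_ < 2 →
        ((A + 2*B) ||| (bx <<< (2*m))) ||| (by_ <<< (2*m+1)) = (A + 4^m*bx) + 2*(B + 4^m*by_) := by
      intro A B bx by_ hA hB hbx hby
      have h2m1 : (2:Nat) ^ (2*m+1) = 2 * 2 ^ (2*m) := by rw [pow_succ]; ring
      have hb1 : bx * 2^(2*m) ≤ 1 * 2^(2*m) := Nat.mul_le_mul_right _ (by omega)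
      rw [Nat.shiftLeft_eq, Nat.shiftLeft_eq,
        nat_lor_pow_add (2*m) _ bx (by omega),
        nat_lor_pow_add (2*m+1) _ by_ (by omega)]
      rw [hp, h2m1]; ring
    have hkeyx : ∀ A B bx : Nat, 3*A < 4^m → 3*B < 4^m → bx < 2 →
        (A + 2*B) ||| (bx <<< (2*m)) = (A + 4^m*bx) + 2*B := by
      intro A B bx hA hB hbx
      rw [Nat.shiftLeft_eq, nat_lor_pow_add (2*m) _ bx (by omega)]
      rw [hp]; ring
    have hkeyy : ∀ A B by_ : Nat, 3*A < 4^m → 3*B < 4^m → by_ < 2 →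
        (A + 2*B) ||| (by_ <<< (2*m+1)) = A + 2*(B + 4^m*by_) := by
      intro A B by_ hA hB hby
      have h2m1 : (2:Nat) ^ (2*m+1) = 2 * 2 ^ (2*m) := by rw [pow_succ]; ring
      rw [Nat.shiftLeft_eq, nat_lor_pow_add (2*m+1) _ by_ (by omega)]
      rw [hp, h2m1]; ring
    have hXlt : ∀ (W : Int) (n j : Nat), 3 * natSpread ((W.emod (2^n)).toNat % 2 ^ j) < 4 ^ j :=
      fun W n j => natSpread_bound j _ (Nat.mod_lt _ (by positivity))
    have hmono : ∀ j : Nat, j ≤ m → (4:Nat)^j ≤ 4^m := fun j hj => Nat.pow_le_pow_right (by omega) hj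
    have hAb : 3 * natSpread ((ix.emod (2^nx_bits.toNat)).toNat % 2 ^ (min m nx_bits.toNat)) < 4 ^ m :=
      lt_of_lt_of_le (hXlt ix _ _) (hmono _ (by omega))
    have hBb : 3 * natSpread ((iy.emod (2^ny_bits.toNat)).toNat % 2 ^ (min m ny_bits.toNat)) < 4 ^ m :=
      lt_of_lt_of_le (hXlt iy _ _) (hmono _ (by omega))
    have hsucc : ∀ (W : Int) (n : Nat), m < n →
        natSpread ((W.emod (2^n)).toNat % 2 ^ (m+1))
          = natSpread ((W.emod (2^n)).toNat % 2 ^ m) + 4 ^ m * ((W.emod (2^n)).toNat / 2 ^ m % 2) := by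
      intro W n hn
      rw [Nat.mod_pow_succ, natSpread_split m _ _ (Nat.mod_lt _ (by positivity)),
        natSpread_bit ((W.emod (2^n)).toNat / 2 ^ m % 2) (by omega)]
    by_cases hx : (m:Int) < nx_bits
    · have hxm : m < nx_bits.toNat := by omega
      have hminx : min m nx_bits.toNat = m := by omega
      have hminx1 : min (m+1) nx_bits.toNat = m + 1 := by omega
      rw [if_pos hx, bit_of_emod ix nx_bits.toNat m hxm]
      by_cases hy : (m:Int) < ny_bits
      · have hym : m < ny_bits.toNat := by omega
        have hminy : min m ny_bits.toNat = m := by omega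
        have hminy1 : min (m+1) ny_bits.toNat = m + 1 := by omega
        rw [if_pos hy, bit_of_emod iy ny_bits.toNat m hym]
        rw [show ∀ u : Nat, ((u:Nat):Int) <<< (2*m) = ((u <<< (2*m) : Nat) : Int) from fun u => rfl,
          PySem.Int.bor_natCast,
          show ∀ u : Nat, ((u:Nat):Int) <<< (2*m+1) = ((u <<< (2*m+1) : Nat) : Int) from fun u => rfl,
          PySem.Int.bor_natCast,
          hkey _ _ _ _ hAb hBb (by omega) (by omega),
          hminx1, hminy1, hsucc ix _ hxm, hsucc iy _ hym, hminx, hminy]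
      · have hminy1 : min (m+1) ny_bits.toNat = min m ny_bits.toNat := by omega
        rw [if_neg hy,
          show ∀ u : Nat, ((u:Nat):Int) <<< (2*m) = ((u <<< (2*m) : Nat) : Int) from fun u => rfl,
          PySem.Int.bor_natCast,
          hkeyx _ _ _ hAb hBb (by omega),
          hminx1, hminy1, hsucc ix _ hxm, hminx]
    · have hminx1 : min (m+1) nx_bits.toNat = min m nx_bits.toNat := by omega
      rw [if_neg hx]
      by_cases hy : (m:Int) < ny_bits
      · have hym : m < ny_bits.toNat := by omega
        have hminy : min m ny_bits.toNat = m := by omega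
        have hminy1 : min (m+1) ny_bits.toNat = m + 1 := by omega
        rw [if_pos hy, bit_of_emod iy ny_bits.toNat m hym,
          show ∀ u : Nat, ((u:Nat):Int) <<< (2*m+1) = ((u <<< (2*m+1) : Nat) : Int) from fun u => rfl,
          PySem.Int.bor_natCast,
          hkeyy _ _ _ hAb hBb (by omega),
          hminx1, hminy1, hsucc iy _ hym, hminy]
      · have hminy1 : min (m+1) ny_bits.toNat = min m ny_bits.toNat := by omega
        rw [if_neg hy, hminx1, hminy1]

theorem morton_encode_2d_spec : Claim_equal_morton_encode_2d := by
  unfold Claim_equal_morton_encode_2d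
  intro ix iy nx_bits ny_bits _
  unfold Spec_morton_encode_2d
  show morton_encode_2d ix iy nx_bits ny_bits = morton_encode_2d_alt ix iy nx_bits ny_bits
  unfold morton_encode_2d morton_encode_2d_alt
  dsimp only
  set nx' := nx_bits.toNat with hnx'
  set ny' := ny_bits.toNat with hny'
  set M := (max nx_bits ny_bits).toNat with hM
  have hle1 : nx_bits ≤ max nx_bits ny_bits := le_max_left _ _
  have hle2 : ny_bits ≤ max nx_bits ny_bits := le_max_right _ _
  have hnxM : nx' ≤ M := Int.toNat_le_toNat hle1
  have hnyM : ny' ≤ M := Int.toNat_le_toNat hle2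
  have hR : PySem.List.pyRange 0 (max nx_bits ny_bits) 1 = PySem.List.pyRange 0 (M:Int) 1 := by
    by_cases h : 0 ≤ max nx_bits ny_bits
    · congr 1; omega
    · rw [PySem.List.pyRange_one_eq_nil (by omega), PySem.List.pyRange_one_eq_nil (by omega)]
  rw [hR, loopA_formula ix iy nx_bits ny_bits M]
  have hcx : ((2^nx' : Nat) : Int) = (2:Int)^nx' := by push_cast; ring
  have hcy : ((2^ny' : Nat) : Int) = (2:Int)^ny' := by push_cast; ring
  have hminx : min M nx' = nx' := by omega
  have hminy : min M ny' = ny' := by omega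

  rw [hminx, hminy]
  have hXlt : (ix.emod (2^nx')).toNat < 2^nx' := by
    have h1 : ix.emod ((2:Int)^nx') < (2:Int)^nx' := Int.emod_lt_of_pos _ (by positivity)
    have h2 : (0:Int) ≤ ix.emod ((2:Int)^nx') := Int.emod_nonneg _ (by positivity)
    omega
  have hYlt : (iy.emod (2^ny')).toNat < 2^ny' := by
    have h1 : iy.emod ((2:Int)^ny') < (2:Int)^ny' := Int.emod_lt_of_pos _ (by positivity)
    have h2 : (0:Int) ≤ iy.emod ((2:Int)^ny') := Int.emod_nonneg _ (by positivity)
    omega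
  rw [Nat.mod_eq_of_lt hXlt, Nat.mod_eq_of_lt hYlt]
  have hshift : ∀ n : Nat, (1:Int) <<< n = ((2^n : Nat) : Int) := by
    intro n
    rw [show (1:Int) = ((1:Nat):Int) from rfl,
      show (((1:Nat):Int)) <<< n = ((1 <<< n : Nat) : Int) from rfl, Nat.one_shiftLeft]
  have hx : (if nx_bits > 0 then PySem.Int.mod ix ((1:Int) <<< nx') else 0).toNat
      = (ix.emod (2^nx')).toNat := by
    by_cases h : nx_bits > 0
    · rw [if_pos h, hshift, PySem.Int.mod_eq_emod_of_pos (by positivity), hcx]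
      rfl
    · rw [if_neg h]
      have h0' : nx' = 0 := by omega
      rw [h0', pow_zero]
      have h1 : Int.emod ix 1 = 0 := Int.emod_one ix
      rw [h1]
  have hy : (if ny_bits > 0 then PySem.Int.mod iy ((1:Int) <<< ny') else 0).toNat
      = (iy.emod (2^ny')).toNat := by
    by_cases h : ny_bits > 0
    · rw [if_pos h, hshift, PySem.Int.mod_eq_emod_of_pos (by positivity), hcy]
      rfl
    · rw [if_neg h]
      have h0' : ny' = 0 := by omega
      rw [h0', pow_zero]
      have h1 : Int.emod iy 1 = 0 := Int.emod_one iy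
      rw [h1]
  simp only [hx, hy, spreadLoop_eq, mul_one, Nat.zero_add]
  push_cast
  ring
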